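-- pv_equiv track=rewrite | github.com/anravix/software_deployment_sawaryn_ravix | packaging_tutorial/build/lib/Vectors_SP/vectors_SP.py | nb_occurence
-- ===== SOURCE A (Python) =====
-- def nb_occurence(chaine):
--     """ Creation of a dictionnary of letters and occurence from a chain chaine
--
--     Note
--     ----
--     The chain can contain upper case.
--
--     Parameters
--     ----------
--     chaine : chain
--         The chain to analyze.
--
-- 	Returns
-- 	-------
-- 	dictionnary
--         The sort dictionnary by alphabetical order of the letters of the chain and their ocurrence in the chain.
--
--     Examples
--     --------
--     >>> nb_occurence("ThiS is String with Upper and lower case Letters")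
--     {' ': 8, 'a': 2, 'c': 1, 'd': 1, 'e': 5, 'g': 1, 'h': 2, 'i': 4, 'l': 2, 'n': 2, 'o': 1,
--     'p': 2, 'r': 4, 's': 5, 't': 5, 'u': 1, 'w': 2}
--
--     """
--     table={}
--     for i in chaine.lower():
--         if i not in table :
--             table[i]=1
--         else:
--             table[i]+=1
--     t=list(table.items())
--     t.sort()
--
--     table_trie = {}
--     for i in t:
--         for j in range(len(i)):
--             table_trie[i[0]] = i[j]
--
--     return table_trie
-- ===== SOURCE B (Python) =====
-- def _runs(s):
--     # run-length encoding of a sorted character list, recursively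
--     if not s:
--         return []
--     c = s[0]
--     k = 1
--     while k < len(s) and s[k] == c:
--         k += 1
--     return [(c, k)] + _runs(s[k:])
--
--
-- def nb_occurence(chaine):
--     # sort every character, then group adjacent equal runs
--     return dict(_runs(sorted(chaine.lower())))
-- ===== Notes on version B (the rewrite author's own statement) =====
-- stated objective: alternative
-- what changed: Replaces A's dict-based count accumulation (then tuple-sort of items and a rebuild loop) by sorting every character of the lowered string and run-length encoding the sorted list recursively, grouping adjacent equal runs.
import Mathlib
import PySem

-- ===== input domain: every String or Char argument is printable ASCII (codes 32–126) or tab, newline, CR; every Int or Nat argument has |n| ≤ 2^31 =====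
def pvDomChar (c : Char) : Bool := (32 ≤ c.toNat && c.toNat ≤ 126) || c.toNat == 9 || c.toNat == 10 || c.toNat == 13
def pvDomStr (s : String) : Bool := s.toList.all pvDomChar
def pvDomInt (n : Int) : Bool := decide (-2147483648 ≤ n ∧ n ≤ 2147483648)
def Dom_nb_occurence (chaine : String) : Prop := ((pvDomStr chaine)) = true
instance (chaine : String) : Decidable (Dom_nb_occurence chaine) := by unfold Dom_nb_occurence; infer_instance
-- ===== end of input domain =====

-- B replaces A's dict-count + tuple-sort + rebuild loop by sorting all characters and run-length encoding the sorted list recursively; objective: alternative.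


-- ===== PORT A =====
-- A character of the Python string is a Lean Char; the dict keyed by one-char strings is
-- modelled with Char keys, each key rendered with Char.toString at the return as the type
-- convention requires.  The second loop's transient write table_trie[i[0]] = i[0] (at j = 0)
-- stores a str where the final dict holds ints; the untyped Python value is modelled as
-- Char ⊕ Int and the surviving Int extracted at the return (exact: every key's last write,
-- at j = 1, is the Int i[1]).
def nb_occurence (chaine : String) : List (String × Int) :=
  let s := (PySem.Str.lower chaine).toList
  let table : PySem.Dict Char Int :=
    s.foldl (fun t i => if ¬ t.contains i then t.insert i 1 else t.insert i (t.getD i 0 + 1))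
      PySem.Dict.empty
  let t := PySem.List.sorted2 table.items (fun p => p.1) (fun p => p.2)
  let table_trie : PySem.Dict Char (Char ⊕ Int) :=
    t.foldl (fun d i =>
        (PySem.List.pyRange 0 2 1).foldl
          (fun d j => d.insert i.1 (if j == 0 then Sum.inl i.1 else Sum.inr i.2)) d)
      PySem.Dict.empty
  table_trie.items.filterMap (fun kv =>
    match kv.2 with
    | Sum.inr n => some (kv.1.toString, n)
    | Sum.inl _ => none)

-- ===== PORT B =====
-- _runs' inner while loop 'k = 1; while k < len(s) and s[k] == c: k += 1' computes
-- 1 + (length of the leading run of c in s[1:]); pvRunLen is that leading-run length.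
def pvRunLen (c : Char) : List Char → Nat
  | [] => 0
  | x :: xs => if x = c then pvRunLen c xs + 1 else 0

theorem pvRunLen_le (c : Char) : ∀ (xs : List Char), pvRunLen c xs ≤ xs.length := by
  intro xs
  induction xs with
  | nil => simp [pvRunLen]
  | cons x xs ih => simp only [pvRunLen, List.length_cons]; split <;> omega

-- _runs: run-length encoding of the sorted character list, recursively on the tail past the run
def pvRuns : List Char → List (Char × Int)
  | [] => []
  | c :: rest =>
    let k := pvRunLen c rest + 1
    [(c, (k : Int))] ++ pvRuns ((c :: rest).drop k)
termination_by t => t.length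
decreasing_by
  simp only [List.drop_succ_cons, List.length_drop, List.length_cons]
  have := pvRunLen_le c rest
  omega

def nb_occurence_alt (chaine : String) : List (String × Int) :=
  let s := PySem.List.sorted (PySem.Str.lower chaine).toList (fun c => c)
  ((pvRuns s).foldl (fun d p => d.insert p.1 p.2)
      (PySem.Dict.empty : PySem.Dict Char Int)).items.map (fun p => (p.1.toString, p.2))

-- ===== PRECONDITION & SPEC =====
def Spec_nb_occurence (chaine : String) (out : List (String × Int)) : Prop := out = nb_occurence_alt chaine
instance (chaine : String) (out : List (String × Int)) : Decidable (Spec_nb_occurence chaine out) := by unfold Spec_nb_occurence; infer_instance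

-- ===== CLAIM (what is proved, stated in full; the proofs are below) =====
def Claim_equal_nb_occurence : Prop := ∀ (chaine : String), Dom_nb_occurence chaine → Spec_nb_occurence chaine (nb_occurence chaine)

-- ===== LEMMAS AND PROOFS =====

-- ---- A-side: A's body equals the canonical "sorted distinct keys with their counts" ----

-- a fold inserting pairs with distinct fresh keys into an empty dict lists exactly those pairs
theorem items_insert_kv {ν ω : Type} (l : List (Char × ν)) (v : Char × ν → ω)
    (h : (l.map (fun p => p.1)).Nodup) :
    (l.foldl (fun d p => d.insert p.1 (v p)) (PySem.Dict.empty : PySem.Dict Char ω)).items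
      = l.map (fun p => (p.1, v p)) := by
  have := PySem.Dict.items_foldl_insert_fresh l (fun p : Char × ν => p.1) v PySem.Dict.empty
    (fun a _ => PySem.Dict.contains_empty _) h
  simpa [PySem.Dict.items, PySem.Dict.empty] using this

-- insertBy only looks at comparisons of x against members of ys
theorem insertBy_congr_mem {α : Type} (b b' : α → α → Bool) (x : α) (ys : List α)
    (h : ∀ y ∈ ys, b x y = b' x y) :
    PySem.List.insertBy b x ys = PySem.List.insertBy b' x ys := by
  induction ys with
  | nil => rfl
  | cons y ys ih =>
    have hy : b x y = b' x y := h y (by simp)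
    simp only [PySem.List.insertBy, hy]
    by_cases hb : b' x y = true
    · simp [hb]
    · simp only [hb, if_false, Bool.false_eq_true]
      rw [ih (fun z hz => h z (by simp [hz]))]

-- an insertion-sort fold only compares elements drawn from acc and xs
theorem foldl_insertBy_congr_mem {α : Type} (b b' : α → α → Bool) :
    ∀ (xs acc : List α), (∀ x ∈ xs, ∀ y, (y ∈ acc ∨ y ∈ xs) → b x y = b' x y) →
      xs.foldl (fun a x => PySem.List.insertBy b x a) acc
        = xs.foldl (fun a x => PySem.List.insertBy b' x a) acc := by
  intro xs
  induction xs with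
  | nil => intro acc _; rfl
  | cons x xs ih =>
    intro acc h
    simp only [List.foldl_cons]
    rw [insertBy_congr_mem b b' x acc (fun y hy => h x (by simp) y (Or.inl hy))]
    exact ih (PySem.List.insertBy b' x acc) (fun x' hx' y hy => by
      rcases hy with hy | hy
      · rcases (PySem.List.mem_insertBy b' x y acc).mp hy with h1 | h2
        · exact h x' (by simp [hx']) y (by simp [h1])
        · exact h x' (by simp [hx']) y (Or.inl h2)
      · exact h x' (by simp [hx']) y (by simp [hy]))

-- when the primary keys of the elements are pairwise distinct, Python's tuple sort is the sort by the first component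
theorem sorted2_eq_sorted_fst {α κ₁ κ₂ : Type} [LinearOrder κ₁] [LinearOrder κ₂]
    (xs : List α) (k1 : α → κ₁) (k2 : α → κ₂)
    (h : xs.Pairwise (fun a b => k1 a ≠ k1 b)) :
    PySem.List.sorted2 xs k1 k2 = PySem.List.sorted xs k1 := by
  have hne : ∀ x ∈ xs, ∀ y ∈ xs, x ≠ y → k1 x ≠ k1 y :=
    h.forall (fun a b hab => hab ∘ Eq.symm)
  rw [PySem.List.sorted_eq_foldl_insertBy]
  simp only [PySem.List.sorted2, Bool.false_eq_true, if_false]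
  apply foldl_insertBy_congr_mem
  intro x hx y hy'
  have hy : y ∈ xs := by
    rcases hy' with hy | hy
    · simp at hy
    · exact hy
  by_cases hxy : x = y
  · subst hxy; simp
  · have hk : k1 x ≠ k1 y := hne x hx y hy hxy
    rcases lt_trichotomy (k1 x) (k1 y) with hlt | heq | hgt
    · simp [hlt]
    · exact absurd heq hk
    · simp [not_lt_of_gt hgt, hgt]

-- A's first loop is collections.Counter of the lowered character list
theorem table_eq_counter (s : List Char) :
    s.foldl (fun t i => if ¬ t.contains i then t.insert i 1 else t.insert i (t.getD i 0 + 1))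
        PySem.Dict.empty
      = PySem.Dict.counter s := by
  rw [← PySem.Dict.foldl_insert_getD_add_one_eq_counter]
  congr 1
  funext t i
  by_cases hc : t.contains i = true
  · simp [hc]
  · have hc' : t.contains i = false := by simpa using hc
    simp [hc', PySem.Dict.getD_of_not_contains t 0 hc']

-- the whole of A, as a function of the lowered character list, in canonical form
theorem nb_occurence_core (s : List Char) :
    ((PySem.List.sorted2
        (s.foldl (fun t i => if ¬ t.contains i then t.insert i 1 else t.insert i (t.getD i 0 + 1))
          (PySem.Dict.empty : PySem.Dict Char Int)).items (fun p => p.1) (fun p => p.2)).foldl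
        (fun d i =>
          (PySem.List.pyRange 0 2 1).foldl
            (fun d j => d.insert i.1 (if j == 0 then Sum.inl i.1 else Sum.inr i.2)) d)
        (PySem.Dict.empty : PySem.Dict Char (Char ⊕ Int))).items.filterMap
      (fun kv => match kv.2 with
        | Sum.inr n => some (kv.1.toString, n)
        | Sum.inl _ => none)
    = (PySem.List.sorted (PySem.Set.ofList s) (fun c => c)).map
        (fun c => (c.toString, (s.count c : Int))) := by
  rw [table_eq_counter s, PySem.Dict.items_counter s]
  have hM : (PySem.Set.ofList s : List Char).Nodup := PySem.Set.nodup_ofList s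
  have hys_pair : (PySem.List.sorted (PySem.Set.ofList s) (fun c => c)).Pairwise (· < ·) :=
    PySem.List.sorted_ofList_pairwise_lt s
  have hne : ((PySem.Set.ofList s : List Char).map
      (fun k => (k, (s.count k : Int)))).Pairwise (fun a b => a.1 ≠ b.1) :=
    List.Pairwise.map _ (fun a b hab => by simpa using hab) hM
  rw [sorted2_eq_sorted_fst _ _ _ hne]
  have hperm : ((PySem.List.sorted (PySem.Set.ofList s) (fun c => c)).map
        (fun k => (k, (s.count k : Int)))).Perm
      ((PySem.Set.ofList s : List Char).map (fun k => (k, (s.count k : Int)))) :=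
    (PySem.List.sorted_perm (PySem.Set.ofList s) (fun c => c) false).map _
  have hpl : ((PySem.List.sorted (PySem.Set.ofList s) (fun c => c)).map
        (fun k => (k, (s.count k : Int)))).Pairwise (fun a b => a.1 < b.1) :=
    hys_pair.map _ (fun a b hab => by simpa using hab)
  rw [PySem.List.sorted_eq_of_perm_of_pairwise_lt _ _ _ hperm hpl]
  have hrange : PySem.List.pyRange 0 2 1 = [0, 1] := by decide
  have hstep : (fun (d : PySem.Dict Char (Char ⊕ Int)) (i : Char × Int) =>
      (PySem.List.pyRange 0 2 1).foldl
        (fun d j => d.insert i.1 (if j == 0 then Sum.inl i.1 else Sum.inr i.2)) d)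
      = fun d i => d.insert i.1 (Sum.inr i.2) := by
    funext d i
    rw [hrange]
    simp [PySem.Dict.insert_insert_self]
  rw [hstep]
  have hfst : (((PySem.List.sorted (PySem.Set.ofList s) (fun c => c)).map
      (fun k => (k, (s.count k : Int)))).map (fun p => p.1)).Nodup := by
    rw [List.map_map]
    have hco : ((fun p : Char × Int => p.1) ∘ fun k => (k, (s.count k : Int))) = id := rfl
    rw [hco, List.map_id]
    exact hys_pair.imp (fun h => ne_of_lt h)
  rw [items_insert_kv _ (fun p => Sum.inr p.2) hfst]
  simp [List.filterMap_map, Function.comp]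

-- ---- B-side: run-length encoding of a sorted list equals the canonical form ----

theorem take_pvRunLen (c : Char) :
    ∀ (xs : List Char), xs.take (pvRunLen c xs) = List.replicate (pvRunLen c xs) c := by
  intro xs
  induction xs with
  | nil => simp [pvRunLen]
  | cons x xs ih =>
    by_cases hx : x = c
    · subst hx; simp [pvRunLen, List.replicate_succ, ih]
    · simp [pvRunLen, hx]

theorem head_drop_pvRunLen (c : Char) :
    ∀ (xs : List Char) (y : Char) (ys : List Char),
      xs.drop (pvRunLen c xs) = y :: ys → y ≠ c := by
  intro xs
  induction xs with
  | nil => intro y ys h; simp at h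
  | cons x xs ih =>
    intro y ys h
    by_cases hx : x = c
    · subst hx
      simp only [pvRunLen] at h
      exact ih y ys h
    · simp [pvRunLen, hx] at h
      intro hyc; exact hx (h.1 ▸ hyc)

-- run-length encoding of a ≤-sorted list = its sorted distinct characters with their counts
theorem pvRuns_sorted : ∀ (n : Nat) (t : List Char), t.length ≤ n → t.Pairwise (· ≤ ·) →
    pvRuns t = (PySem.List.sorted (PySem.Set.ofList t) (fun c => c)).map
      (fun c => (c, (t.count c : Int))) := by
  intro n
  induction n with
  | zero =>
    intro t hlen _
    have : t = [] := List.length_eq_zero_iff.mp (Nat.le_zero.mp hlen)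
    subst this
    simp [pvRuns, PySem.Set.ofList, PySem.List.sorted_eq_nil_iff]
  | succ n ih =>
    intro t hlen hpair
    match t with
    | [] => simp [pvRuns, PySem.Set.ofList, PySem.List.sorted_eq_nil_iff]
    | c :: rest =>
      set k := pvRunLen c rest with hk
      have hkle : k ≤ rest.length := pvRunLen_le c rest
      have hsplit : rest = List.replicate k c ++ rest.drop k := by
        conv_lhs => rw [← List.take_append_drop k rest]
        rw [hk, take_pvRunLen]
      have hcle : ∀ x ∈ rest, c ≤ x := (List.pairwise_cons.mp hpair).1
      have hdpair : (rest.drop k).Pairwise (· ≤ ·) :=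
        ((List.pairwise_cons.mp hpair).2).sublist (List.drop_sublist k rest)
      have hdgt : ∀ x ∈ rest.drop k, c < x := by
        cases hdd : rest.drop k with
        | nil => simp
        | cons y ys =>
          have hyne : y ≠ c := head_drop_pvRunLen c rest y ys (by rw [← hk]; exact hdd)
          have hymem : y ∈ rest := by
            rw [hsplit, hdd]; exact List.mem_append_right _ (by simp)
          have hcy : c < y := lt_of_le_of_ne (hcle y hymem) (Ne.symm hyne)
          intro x hx
          rcases List.mem_cons.mp hx with h1 | h2
          · exact h1 ▸ hcy
          · exact lt_of_lt_of_le hcy ((List.pairwise_cons.mp (hdd ▸ hdpair)).1 x h2)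
      have hcnotd : c ∉ rest.drop k := fun h => lt_irrefl c (hdgt c h)
      have hcount_c : (c :: rest).count c = k + 1 := by
        conv_lhs => rw [hsplit]
        simp [List.count_append, List.count_eq_zero.mpr hcnotd]
      have hcount_tail : ∀ x ∈ rest.drop k, (c :: rest).count x = (rest.drop k).count x := by
        intro x hx
        have hxc : x ≠ c := fun h => lt_irrefl c (h ▸ hdgt x hx)
        conv_lhs => rw [hsplit]
        simp [List.count_append, List.count_replicate, Ne.symm hxc]
      -- the sorted distinct characters of t are c followed by those of rest.drop k
      have hdsort_pair : (PySem.List.sorted (PySem.Set.ofList (rest.drop k)) (fun c => c)).Pairwise (· < ·) :=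
        PySem.List.sorted_ofList_pairwise_lt (rest.drop k)
      have hdsort_mem : ∀ x, x ∈ PySem.List.sorted (PySem.Set.ofList (rest.drop k)) (fun c => c) ↔ x ∈ rest.drop k := by
        intro x
        rw [PySem.List.mem_sorted]
        simp [PySem.Set.mem_ofList]
      have hys_pair : (c :: PySem.List.sorted (PySem.Set.ofList (rest.drop k)) (fun c => c)).Pairwise (· < ·) := by
        refine List.pairwise_cons.mpr ⟨?_, hdsort_pair⟩
        intro x hx
        exact hdgt x ((hdsort_mem x).mp hx)
      have hys_nodup : (c :: PySem.List.sorted (PySem.Set.ofList (rest.drop k)) (fun c => c)).Nodup :=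
        hys_pair.imp (fun h => ne_of_lt h)
      have hperm : (c :: PySem.List.sorted (PySem.Set.ofList (rest.drop k)) (fun c => c)).Perm
          (PySem.Set.ofList (c :: rest)) := by
        refine (List.perm_ext_iff_of_nodup hys_nodup (PySem.Set.nodup_ofList _)).mpr ?_
        intro x
        simp only [PySem.Set.mem_ofList, List.mem_cons, hdsort_mem]
        constructor
        · rintro (h | h)
          · exact Or.inl h
          · refine Or.inr ?_
            rw [hsplit]
            exact List.mem_append_right _ h
        · rintro (h | h)
          · exact Or.inl h
          · rw [hsplit] at h
            rcases List.mem_append.mp h with h1 | h2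
            · exact Or.inl (List.eq_of_mem_replicate h1)
            · exact Or.inr h2
      have hset : PySem.List.sorted (PySem.Set.ofList (c :: rest)) (fun c => c)
          = c :: PySem.List.sorted (PySem.Set.ofList (rest.drop k)) (fun c => c) :=
        PySem.List.sorted_eq_of_perm_of_pairwise_lt _ _ _ hperm hys_pair
      have hih : pvRuns (rest.drop k) = (PySem.List.sorted (PySem.Set.ofList (rest.drop k)) (fun c => c)).map
          (fun c => (c, ((rest.drop k).count c : Int))) := by
        refine ih _ ?_ hdpair
        have hlr : (rest.drop k).length = rest.length - k := List.length_drop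
        simp only [List.length_cons] at hlen
        omega
      rw [pvRuns, hset]
      simp only [List.singleton_append, List.drop_succ_cons, ← hk, List.map_cons]
      congr 1
      · rw [hcount_c]
      · rw [hih]
        refine List.map_congr_left ?_
        intro x hx
        rw [hcount_tail x ((hdsort_mem x).mp hx)]

-- the whole of B, as a function of the lowered character list, in the same canonical form
theorem nb_occurence_alt_core (s : List Char) :
    ((pvRuns (PySem.List.sorted s (fun c => c))).foldl (fun d p => d.insert p.1 p.2)
        (PySem.Dict.empty : PySem.Dict Char Int)).items.map (fun p => (p.1.toString, p.2))
    = (PySem.List.sorted (PySem.Set.ofList s) (fun c => c)).map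
        (fun c => (c.toString, (s.count c : Int))) := by
  set t := PySem.List.sorted s (fun c => c) with ht
  have htperm : t.Perm s := PySem.List.sorted_perm s (fun c => c) false
  have htpair : t.Pairwise (· ≤ ·) := by
    have := PySem.List.sorted_pairwise s (fun c => c) (κ := Char)
    simpa using this
  -- distinct characters of t and of s sort identically
  have hsetseq : PySem.List.sorted (PySem.Set.ofList t) (fun c => c)
      = PySem.List.sorted (PySem.Set.ofList s) (fun c => c) := by
    refine PySem.List.sorted_eq_sorted_of_perm _ _ _ (fun a b h => h) ?_
    refine (List.perm_ext_iff_of_nodup (PySem.Set.nodup_ofList _) (PySem.Set.nodup_ofList _)).mpr ?_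
    intro x
    rw [PySem.Set.mem_ofList, PySem.Set.mem_ofList]
    exact ⟨fun h => htperm.mem_iff.mp h, fun h => htperm.mem_iff.mpr h⟩
  have hruns : pvRuns t = (PySem.List.sorted (PySem.Set.ofList s) (fun c => c)).map
      (fun c => (c, (s.count c : Int))) := by
    rw [pvRuns_sorted t.length t le_rfl htpair, hsetseq]
    refine List.map_congr_left ?_
    intro x _
    rw [htperm.count_eq]
  rw [hruns]
  have hys_pair : (PySem.List.sorted (PySem.Set.ofList s) (fun c => c)).Pairwise (· < ·) :=
    PySem.List.sorted_ofList_pairwise_lt s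
  have hfst : (((PySem.List.sorted (PySem.Set.ofList s) (fun c => c)).map
      (fun k => (k, (s.count k : Int)))).map (fun p => p.1)).Nodup := by
    rw [List.map_map]
    have hco : ((fun p : Char × Int => p.1) ∘ fun k => (k, (s.count k : Int))) = id := rfl
    rw [hco, List.map_id]
    exact hys_pair.imp (fun h => ne_of_lt h)
  rw [items_insert_kv _ (fun p => p.2) hfst]
  simp [List.map_map, Function.comp]

-- ===== VERDICT (by name: the statement is the Claim_ definition above) =====
theorem nb_occurence_spec : Claim_equal_nb_occurence := by
  intro chaine _
  show nb_occurence chaine = nb_occurence_alt chaine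
  unfold nb_occurence nb_occurence_alt
  rw [nb_occurence_core ((PySem.Str.lower chaine).toList),
      nb_occurence_alt_core ((PySem.Str.lower chaine).toList)]
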